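-- pv_equiv track=rewrite | github.com/luohaojie-tt/douyin-danmaku-tts | src/douyin/cookie.py | _parse_ttwid
-- ===== SOURCE A (Python) =====
-- from typing import Optional
--
-- def _parse_ttwid(content: str) -> Optional[str]:
--     """
--     从文件内容中解析ttwid
--
--     支持的格式：
--     - ttwid=xxx
--     - ttwid = xxx
--     - # ttwid=xxx (注释行)
--
--     Args:
--         content: 文件内容
--
--     Returns:
--         str | None: 解析出的ttwid，如果未找到返回None
--     """
--     ttwid = None
--
--     for line in content.split('\n'):
--         line = line.strip()
--
--         # 跳过注释行
--         if line.startswith('#'):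
--             continue
--
--         # 跳过空行
--         if not line:
--             continue
--
--         # 解析 "ttwid=xxx" 或 "ttwid = xxx"
--         if '=' in line:
--             key, value = line.split('=', 1)
--             key = key.strip()
--             value = value.strip()
--
--             if key == 'ttwid':
--                 ttwid = value
--                 break
--
--     return ttwid
-- ===== SOURCE B (Python) =====
-- from typing import Optional
--
-- # Index-based scanner: instead of splitting into lines and parsing each with
-- # strip/split('=',1), walk the raw string by line-start positions and try to
-- # match the pattern  [ \t\r]* 'ttwid' [ \t\r]* '='  in place; on a hit, the
-- # value is the rest of that line, stripped.
--
-- def _try_match(content: str, i: int) -> Optional[str]: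
--     n = len(content)
--     j = i
--     while j < n and content[j] in ' \t\r':
--         j += 1
--     if not content.startswith('ttwid', j):
--         return None
--     j += 5
--     while j < n and content[j] in ' \t\r':
--         j += 1
--     if j >= n or content[j] != '=':
--         return None
--     k = content.find('\n', j)
--     if k == -1:
--         k = n
--     return content[j + 1:k].strip()
--
-- def _parse_ttwid(content: str) -> Optional[str]:
--     i = 0
--     while True:
--         v = _try_match(content, i)
--         if v is not None:
--             return v
--         nl = content.find('\n', i)
--         if nl == -1:
--             return None
--         i = nl + 1
-- ===== Notes on version B (the rewrite author's own statement) =====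
-- stated objective: alternative
-- what changed: Replaces A's split-into-lines loop (strip each line, skip comments/blanks, split('=',1), compare the key) with an index-based scanner over the raw string that at each line-start position matches the pattern [ \t\r]* 'ttwid' [ \t\r]* '=' in place and returns the rest of that line stripped; no per-line strings or key/value splitting are materialised.
import Mathlib
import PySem

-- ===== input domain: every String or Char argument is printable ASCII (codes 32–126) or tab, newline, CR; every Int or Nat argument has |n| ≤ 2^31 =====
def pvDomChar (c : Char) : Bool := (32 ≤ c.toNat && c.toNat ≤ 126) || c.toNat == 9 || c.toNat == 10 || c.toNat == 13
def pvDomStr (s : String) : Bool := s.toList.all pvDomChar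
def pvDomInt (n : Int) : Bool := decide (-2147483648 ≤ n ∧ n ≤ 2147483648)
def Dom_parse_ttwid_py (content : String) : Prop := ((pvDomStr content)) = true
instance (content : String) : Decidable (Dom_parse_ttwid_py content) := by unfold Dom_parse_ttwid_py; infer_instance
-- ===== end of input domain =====

-- B replaces A's split-into-lines / strip / split('=',1) parsing by an index-based
-- scanner over the raw string: at each line-start position it matches the pattern
-- [ \t\r]* 'ttwid' [ \t\r]* '=' in place and returns the rest of that line, stripped
-- (objective: alternative — a different traversal, same O(n) cost).

-- ===== PORT A =====
-- the for-loop of _parse_ttwid: accumulator ttwid, break = returning some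
def pvALoop : List (List Char) → Option (List Char)
  | [] => none
  | l :: rest =>
    let line := PySem.Chars.strip l
    if PySem.Chars.startswith line ['#'] then pvALoop rest
    else if line.isEmpty then pvALoop rest
    else if PySem.Chars.isIn ['='] line then
      match PySem.Chars.splitOnMax line ['='] 1 with
      | [key, value] =>
          if PySem.Chars.strip key = "ttwid".toList then some (PySem.Chars.strip value)
          else pvALoop rest
      | _ => pvALoop rest   -- unreachable: split('=', 1) with '=' in line gives exactly two parts
    else pvALoop rest

def parse_ttwid_py (content : String) : Option String :=
  (pvALoop (PySem.Chars.splitOn content.toList ['\n'])).map String.ofList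

-- ===== PORT B =====
-- the character class ' \t\r' of Source B's inner while-loops
def pvCls (c : Char) : Bool := c == ' ' || c == '\t' || c == '\r'

-- _try_match(content, i) on the suffix s = content[i:]: the two index while-loops
-- are dropWhile pvCls, content.startswith('ttwid', j) is isPrefixOf on the suffix,
-- content.find('\n', j) + slice [j+1:k] is takeWhile (· ≠ '\n') (exact: the first
-- '\n' at or after j is the first '\n' after the matched '=')
def pvBTry (s : List Char) : Option (List Char) :=
  let r := s.dropWhile pvCls
  if ("ttwid".toList).isPrefixOf r then
    match (r.drop 5).dropWhile pvCls with
    | c :: v =>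
        if c = '=' then some (PySem.Chars.strip (v.takeWhile (fun x => decide (x ≠ '\n'))))
        else none
    | [] => none
  else none

-- the while True loop of _parse_ttwid: i is represented by the suffix s = content[i:];
-- content.find('\n', i) = -1 is dropWhile (· ≠ '\n') s = [], i = nl + 1 is its tail;
-- the fuel argument only makes the recursion structural (it never runs out: each
-- step removes at least one character)
def pvBSearch.go : Nat → List Char → Option (List Char)
  | 0, _ => none
  | fuel + 1, s =>
    match pvBTry s with
    | some v => some v
    | none =>
      match s.dropWhile (fun c => decide (c ≠ '\n')) with
      | [] => none
      | _ :: t => pvBSearch.go fuel t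

def pvBSearch (s : List Char) : Option (List Char) := pvBSearch.go (s.length + 1) s

def parse_ttwid_py_alt (content : String) : Option String :=
  (pvBSearch content.toList).map String.ofList

-- ===== PRECONDITION & SPEC =====
-- A is total (it never raises), so Pre_ excludes nothing: it is trivially satisfied by
-- every string; it names the "ttwid = value" line shape only so that sampled inputs
-- include contents on which the parse succeeds as well as ones on which it fails.
def Pre_parse_ttwid_py (content : String) : Prop :=
  0 ≤ PySem.Str.count content "ttwid = value"
instance (content : String) : Decidable (Pre_parse_ttwid_py content) := by
  unfold Pre_parse_ttwid_py; infer_instance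
def pvWitness_parse_ttwid_py : String := "# comment\nttwid = abc\nx=y"

def Spec_parse_ttwid_py (content : String) (out : Option String) : Prop := out = parse_ttwid_py_alt content
instance (content : String) (out : Option String) : Decidable (Spec_parse_ttwid_py content out) := by unfold Spec_parse_ttwid_py; infer_instance

-- ===== CLAIM =====
def Claim_equal_parse_ttwid_py : Prop := ∀ (content : String), Dom_parse_ttwid_py content → Pre_parse_ttwid_py content → Spec_parse_ttwid_py content (parse_ttwid_py content)

-- ===== LEMMAS AND PROOFS =====

-- the lines of s, as produced by s.split('\n') (proof-only helper)
def pvLines (s : List Char) : List (List Char) :=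
  if _hd : s.dropWhile (fun c => decide (c ≠ '\n')) = [] then
    [s.takeWhile (fun c => decide (c ≠ '\n'))]
  else
    s.takeWhile (fun c => decide (c ≠ '\n')) :: pvLines (s.dropWhile (fun c => decide (c ≠ '\n'))).tail
termination_by s.length
decreasing_by
  rw [List.length_tail]
  have h1 := List.length_dropWhile_le (fun c => decide (c ≠ '\n')) s
  have h2 : (s.dropWhile (fun c => decide (c ≠ '\n'))).length ≠ 0 := by
    simpa [List.length_eq_zero_iff] using _hd
  omega

-- on domain characters other than '\n', Python's str.isspace agrees with Source B's class ' \t\r'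
theorem pv_cls_eq (c : Char) (h1 : pvDomChar c = true) (h2 : c ≠ '\n') :
    PySem.Chars.isspace c = pvCls c := by
  have hinj : ∀ d : Char, c.toNat = d.toNat → c = d := by
    intro d h; exact Char.ext (UInt32.toNat_inj.mp h)
  have h10 : c.toNat ≠ 10 := fun h => h2 (hinj '\n' h)
  simp only [pvDomChar, Bool.or_eq_true, Bool.and_eq_true, decide_eq_true_eq, beq_iff_eq] at h1
  apply Bool.eq_iff_iff.mpr
  simp only [PySem.Chars.isspace, pvCls, Bool.or_eq_true, Bool.and_eq_true, decide_eq_true_eq,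
    beq_iff_eq]
  constructor
  · intro h
    have hn : c.toNat = 32 ∨ c.toNat = 9 ∨ c.toNat = 13 := by omega
    rcases hn with hn | hn | hn
    · exact Or.inl (Or.inl (hinj ' ' hn))
    · exact Or.inl (Or.inr (hinj '\t' hn))
    · exact Or.inr (hinj '\r' hn)
  · rintro ((rfl | rfl) | rfl) <;> decide

theorem pv_dropWhile_congr {p q : Char → Bool} (l : List Char) (h : ∀ c ∈ l, p c = q c) :
    l.dropWhile p = l.dropWhile q := by
  induction l with
  | nil => rfl
  | cons c r ih =>
    rw [List.dropWhile_cons, List.dropWhile_cons, h c (by simp)]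
    split_ifs with hq
    · exact ih fun c hc => h c (by simp [hc])
    · rfl

theorem pv_dropWhile_head {p : Char → Bool} {l : List Char} {c : Char} {r : List Char}
    (h : l.dropWhile p = c :: r) : p c = false := by
  induction l with
  | nil => simp at h
  | cons x xs ih =>
    rw [List.dropWhile_cons] at h
    split_ifs at h with hx
    · exact ih h
    · cases h; simpa using hx

theorem pv_dropWhile_all {p : Char → Bool} {x : List Char} (hx : ∀ c ∈ x, p c = true)
    (y : List Char) : (x ++ y).dropWhile p = y.dropWhile p := by
  rw [List.dropWhile_append, if_pos]
  simp [List.dropWhile_eq_nil_iff.mpr hx]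

theorem pv_dropWhile_stop {p : Char → Bool} {c : Char} (hc : p c = false) (x y : List Char) :
    (x ++ c :: y).dropWhile p = x.dropWhile p ++ c :: y := by
  rw [List.dropWhile_append]
  split_ifs with h
  · rw [List.isEmpty_iff] at h
    rw [h, List.nil_append, List.dropWhile_cons, hc]
    simp
  · rfl

theorem pv_rstrip_keep {c : Char} (hc : PySem.Chars.isspace c = false) (x y : List Char) :
    PySem.Chars.rstrip (x ++ c :: y) = x ++ c :: PySem.Chars.rstrip y := by
  unfold PySem.Chars.rstrip
  rw [show (x ++ c :: y).reverse = y.reverse ++ c :: x.reverse by simp,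
    pv_dropWhile_stop hc]
  simp

theorem pv_rstrip_space {w : List Char} (hw : ∀ c ∈ w, PySem.Chars.isspace c = true)
    (x : List Char) : PySem.Chars.rstrip (x ++ w) = PySem.Chars.rstrip x := by
  unfold PySem.Chars.rstrip
  rw [List.reverse_append, pv_dropWhile_all (fun c hc => hw c (by simpa using hc))]

theorem pv_rstrip_decomp (a : List Char) :
    ∃ w, a = PySem.Chars.rstrip a ++ w ∧ ∀ c ∈ w, PySem.Chars.isspace c = true := by
  refine ⟨(a.reverse.takeWhile PySem.Chars.isspace).reverse, ?_, ?_⟩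
  · unfold PySem.Chars.rstrip
    apply List.reverse_injective
    simp
  · intro c hc
    exact List.mem_takeWhile_imp (by simpa using hc)

theorem pv_mem_rstrip {c : Char} {x : List Char} (h : c ∈ PySem.Chars.rstrip x) : c ∈ x := by
  unfold PySem.Chars.rstrip at h
  rw [List.mem_reverse] at h
  have := (List.dropWhile_sublist (l := x.reverse) PySem.Chars.isspace).subset h
  simpa using this

theorem pv_rstrip_idem (y : List Char) :
    PySem.Chars.rstrip (PySem.Chars.rstrip y) = PySem.Chars.rstrip y := by
  unfold PySem.Chars.rstrip
  rw [List.reverse_reverse]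
  cases h : y.reverse.dropWhile PySem.Chars.isspace with
  | nil => simp
  | cons c r =>
    rw [List.dropWhile_cons, pv_dropWhile_head h]
    simp

theorem pv_strip_rstrip (b : List Char) :
    PySem.Chars.strip (PySem.Chars.rstrip b) = PySem.Chars.strip b := by
  unfold PySem.Chars.strip PySem.Chars.lstrip
  have hw : ∀ c ∈ b.takeWhile PySem.Chars.isspace, PySem.Chars.isspace c = true :=
    fun c hc => List.mem_takeWhile_imp hc
  cases hu : b.dropWhile PySem.Chars.isspace with
  | nil =>
    have hall : ∀ c ∈ b, PySem.Chars.isspace c = true := List.dropWhile_eq_nil_iff.mp hu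
    have h1 : PySem.Chars.rstrip b = [] := by
      rw [show b = [] ++ b by simp, pv_rstrip_space hall]; rfl
    rw [h1]; rfl
  | cons c u' =>
    have hc : PySem.Chars.isspace c = false := pv_dropWhile_head hu
    have hb := List.takeWhile_append_dropWhile (p := PySem.Chars.isspace) (l := b)
    rw [hu] at hb
    have h1 : PySem.Chars.rstrip b = b.takeWhile PySem.Chars.isspace ++ c :: PySem.Chars.rstrip u' := by
      conv_lhs => rw [← hb]
      rw [pv_rstrip_keep hc]
    rw [h1, pv_dropWhile_all hw, List.dropWhile_cons, hc]
    simp only [Bool.false_eq_true, if_false]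
    rw [show (c :: PySem.Chars.rstrip u') = [] ++ c :: PySem.Chars.rstrip u' from rfl,
      pv_rstrip_keep hc, pv_rstrip_idem,
      show (c :: u') = [] ++ c :: u' from rfl, pv_rstrip_keep hc]

theorem pv_prefix_nl {w : List Char} (hw : '\n' ∉ w) (x t : List Char) :
    w <+: x ++ '\n' :: t ↔ w <+: x := by
  constructor
  · intro h
    by_cases hl : w.length ≤ x.length
    · exact (List.isPrefix_append_of_length hl).mp h
    · exfalso
      obtain ⟨r, hr⟩ := h
      have h1 : (w ++ r).take (x.length + 1) = w.take (x.length + 1) :=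
        List.take_append_of_le_length (by omega)
      have h2 : (x ++ '\n' :: t).take (x.length + 1) = x ++ ['\n'] := by
        rw [show x ++ '\n' :: t = (x ++ ['\n']) ++ t by simp]
        exact List.take_left' (by simp)
      have h3 : w.take (x.length + 1) = x ++ ['\n'] := by rw [← h1, hr, h2]
      exact hw (List.mem_of_mem_take (l := w) (h3 ▸ (by simp : '\n' ∈ x ++ ['\n'])))
  · intro h
    exact h.trans (List.prefix_append x ('\n' :: t))

-- the first-'=' decomposition of a list containing '='
theorem pv_first_eq_decomp {m : List Char} (h : '=' ∈ m) :
    ∃ a b, m = a ++ '=' :: b ∧ '=' ∉ a := by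
  induction m with
  | nil => cases h
  | cons c k ih =>
    by_cases hc : c = '='
    · exact ⟨[], k, by simp [hc], by simp⟩
    · have h' : '=' ∈ k := by
        rcases List.mem_cons.1 h with h' | h'
        · exact absurd h'.symm hc
        · exact h'
      rcases ih h' with ⟨a, b, rfl, ha⟩
      refine ⟨c :: a, b, rfl, ?_⟩
      simp only [List.mem_cons, not_or]
      exact ⟨Ne.symm hc, ha⟩

theorem pv_go_m0 {fuel : Nat} (hf : 1 ≤ fuel) (b : List Char) (acc : List (List Char)) :
    PySem.Chars.splitOnMax.go ['='] fuel 0 b [] acc = (b :: acc).reverse := by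
  obtain ⟨f, rfl⟩ : ∃ f, fuel = f + 1 := ⟨fuel - 1, by omega⟩
  cases b <;> simp [PySem.Chars.splitOnMax.go]

theorem pv_go_decomp {a : List Char} (ha : '=' ∉ a) :
    ∀ (fuel : Nat) (b cur : List Char) (acc : List (List Char)),
    (a ++ '=' :: b).length < fuel →
    PySem.Chars.splitOnMax.go ['='] fuel 1 (a ++ '=' :: b) cur acc
      = (b :: (cur.reverse ++ a) :: acc).reverse := by
  induction a with
  | nil =>
    intro fuel b cur acc hlen
    obtain ⟨f, rfl⟩ : ∃ f, fuel = f + 1 := ⟨fuel - 1, by omega⟩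
    simp only [List.nil_append]
    simp [PySem.Chars.splitOnMax.go, List.isPrefixOf]
    rw [pv_go_m0 (by simp at hlen; omega)]
    simp
  | cons c a' ih =>
    intro fuel b cur acc hlen
    have hc : c ≠ '=' := fun hc => ha (by simp [hc])
    obtain ⟨f, rfl⟩ : ∃ f, fuel = f + 1 := ⟨fuel - 1, by omega⟩
    simp only [List.cons_append]
    simp [PySem.Chars.splitOnMax.go, List.isPrefixOf, Ne.symm hc]
    rw [ih (fun hm => ha (List.mem_cons_of_mem _ hm)) f b (c :: cur) acc (by simp at hlen ⊢; omega)]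
    simp

theorem pv_splitOnMax_decomp {a : List Char} (ha : '=' ∉ a) (b : List Char) :
    PySem.Chars.splitOnMax (a ++ '=' :: b) ['='] 1 = [a, b] := by
  unfold PySem.Chars.splitOnMax
  rw [if_neg (by norm_num), show (1 : Int).toNat = 1 from rfl]
  rw [pv_go_decomp ha _ _ _ _ (by omega)]
  simp

-- A's loop body as a pure per-line value (proof-only helper)
def pvAHit (m : List Char) : Option (List Char) :=
  if PySem.Chars.startswith m ['#'] then none
  else if m.isEmpty then none
  else if PySem.Chars.isIn ['='] m then
    match PySem.Chars.splitOnMax m ['='] 1 with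
    | [key, value] =>
        if PySem.Chars.strip key = "ttwid".toList then some (PySem.Chars.strip value) else none
    | _ => none
  else none

theorem pv_aloop_cons (l : List Char) (rest : List (List Char)) :
    pvALoop (l :: rest) = match pvAHit (PySem.Chars.strip l) with
      | some v => some v
      | none => pvALoop rest := by
  rw [pvALoop.eq_def]
  unfold pvAHit
  by_cases h1 : PySem.Chars.startswith (PySem.Chars.strip l) ['#'] = true
  · simp only [h1, if_true]
  · simp only [Bool.not_eq_true] at h1
    simp only [h1, Bool.false_eq_true, if_false]
    by_cases h2 : (PySem.Chars.strip l).isEmpty = true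
    · simp only [h2, if_true]
    · simp only [Bool.not_eq_true] at h2
      simp only [h2, Bool.false_eq_true, if_false]
      by_cases h3 : PySem.Chars.isIn ['='] (PySem.Chars.strip l) = true
      · simp only [h3, if_true]
        rcases hs : PySem.Chars.splitOnMax (PySem.Chars.strip l) ['='] 1 with _ | ⟨k, _ | ⟨v, _ | ⟨w, ws⟩⟩⟩
        · rfl
        · rfl
        · dsimp only
          by_cases hcond : PySem.Chars.strip k = "ttwid".toList
          · rw [if_pos hcond, if_pos hcond]
          · rw [if_neg hcond, if_neg hcond]
        · rfl
      · simp only [Bool.not_eq_true] at h3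
        simp only [h3, Bool.false_eq_true, if_false]

-- the per-line equivalence: Source B's in-place matcher agrees with A's loop body
theorem pv_try_eq_ahit (l : List Char) (hdom : ∀ c ∈ l, pvDomChar c = true)
    (hnl : '\n' ∉ l) : pvBTry l = pvAHit (PySem.Chars.strip l) := by
  have httw : ("ttwid".toList : List Char) = 't' :: 't' :: 'w' :: 'i' :: 'd' :: [] := rfl
  have hcls : l.dropWhile pvCls = PySem.Chars.lstrip l := by
    unfold PySem.Chars.lstrip
    exact pv_dropWhile_congr l (fun c hc =>
      (pv_cls_eq c (hdom c hc) (fun h => hnl (h ▸ hc))).symm)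
  have husub : ∀ c ∈ PySem.Chars.lstrip l, c ∈ l := fun c hc =>
    (List.dropWhile_sublist _).subset hc
  have hudom : ∀ c ∈ PySem.Chars.lstrip l, pvDomChar c = true := fun c hc => hdom c (husub c hc)
  have hunl : '\n' ∉ PySem.Chars.lstrip l := fun hc => hnl (husub _ hc)
  have hsl : PySem.Chars.strip l = PySem.Chars.rstrip (PySem.Chars.lstrip l) := rfl
  have hspace_cls : ∀ c ∈ PySem.Chars.lstrip l, PySem.Chars.isspace c = pvCls c := fun c hc =>
    pv_cls_eq c (hudom c hc) (fun h => hunl (h ▸ hc))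
  simp only [pvBTry]
  rw [hcls]
  by_cases hmem : '=' ∈ PySem.Chars.lstrip l
  · obtain ⟨a, b, hab, hna⟩ := pv_first_eq_decomp hmem
    have hbsub : ∀ c ∈ b, c ∈ PySem.Chars.lstrip l := fun c hc => by rw [hab]; simp [hc]
    have hnb : '\n' ∉ b := fun hc => hunl (hbsub _ hc)
    have hbtake : b.takeWhile (fun x => decide (x ≠ '\n')) = b :=
      List.takeWhile_eq_self_iff.mpr (fun x hx => by
        simp only [decide_eq_true_eq]; exact fun h => hnb (h ▸ hx))
    have hm : PySem.Chars.strip l = a ++ '=' :: PySem.Chars.rstrip b := by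
      rw [hsl, hab, pv_rstrip_keep (by decide)]
    by_cases hkey : PySem.Chars.strip a = "ttwid".toList
    · -- the line does carry "ttwid = value": both sides return the stripped value
      have hane : a ≠ [] := by
        rintro rfl
        rw [show PySem.Chars.strip [] = [] from rfl] at hkey
        exact absurd hkey (by decide)
      obtain ⟨c0, a', rfl⟩ := List.exists_cons_of_ne_nil hane
      have hc0 : PySem.Chars.isspace c0 = false := by
        have h2 := hab
        rw [show PySem.Chars.lstrip l = List.dropWhile PySem.Chars.isspace l from rfl,
          List.cons_append] at h2
        exact pv_dropWhile_head h2
      have hls : PySem.Chars.lstrip (c0 :: a') = c0 :: a' := by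
        unfold PySem.Chars.lstrip; rw [List.dropWhile_cons, hc0]; simp
      have hkey' : PySem.Chars.rstrip (c0 :: a') = "ttwid".toList := by
        rw [show PySem.Chars.strip (c0 :: a')
            = PySem.Chars.rstrip (PySem.Chars.lstrip (c0 :: a')) from rfl, hls] at hkey
        exact hkey
      obtain ⟨w, haw, hws⟩ := pv_rstrip_decomp (c0 :: a')
      rw [hkey'] at haw
      have hwsubu : ∀ c ∈ w, c ∈ PySem.Chars.lstrip l := by
        intro c hc
        rw [hab]
        exact List.mem_append_left _ (by rw [haw]; exact List.mem_append_right _ hc)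
      have hwcls : ∀ c ∈ w, pvCls c = true := fun c hc => by
        rw [← hspace_cls c (hwsubu c hc)]; exact hws c hc
      have hupre : ("ttwid".toList).isPrefixOf (PySem.Chars.lstrip l) = true := by
        rw [List.isPrefixOf_iff_prefix, hab, haw, List.append_assoc]
        exact List.prefix_append _ _
      have hdrop : (PySem.Chars.lstrip l).drop 5 = w ++ '=' :: b := by
        rw [hab, haw, List.append_assoc]
        exact List.drop_left' (by decide)
      have hq : ((PySem.Chars.lstrip l).drop 5).dropWhile pvCls = '=' :: b := by
        rw [hdrop, pv_dropWhile_all hwcls, List.dropWhile_cons,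
          show pvCls '=' = false from by decide]
        simp
      have hm2 : PySem.Chars.strip l = 't' :: 't' :: 'w' :: 'i' :: 'd' :: (w ++ '=' :: PySem.Chars.rstrip b) := by
        rw [hm, haw, httw]
        simp
      have h1 : PySem.Chars.startswith (PySem.Chars.strip l) ['#'] = false := by
        rw [hm2]
        simp [PySem.Chars.startswith, List.isPrefixOf]
      have h2 : (PySem.Chars.strip l).isEmpty = false := by rw [hm2]; rfl
      have h3 : PySem.Chars.isIn ['='] (PySem.Chars.strip l) = true := by
        rw [PySem.Chars.isIn_iff_infix, List.singleton_infix_iff, hm]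
        simp
      have h4 : PySem.Chars.splitOnMax (PySem.Chars.strip l) ['='] 1 = [c0 :: a', PySem.Chars.rstrip b] := by
        rw [hm]; exact pv_splitOnMax_decomp hna _
      have hAside : pvAHit (PySem.Chars.strip l) = some (PySem.Chars.strip (PySem.Chars.rstrip b)) := by
        unfold pvAHit
        rw [h1, h2, h3, h4]
        simp [hkey]
      rw [if_pos hupre, hq, hAside, pv_strip_rstrip]
      dsimp only
      rw [if_pos rfl, hbtake]
    · -- the key differs from "ttwid": both sides reject the line
      have h4 : PySem.Chars.splitOnMax (PySem.Chars.strip l) ['='] 1 = [a, PySem.Chars.rstrip b] := by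
        rw [hm]; exact pv_splitOnMax_decomp hna _
      have hkey2 : ¬ PySem.Chars.strip a = ['t', 't', 'w', 'i', 'd'] := by
        rw [← httw]; exact hkey
      have hA : pvAHit (PySem.Chars.strip l) = none := by
        unfold pvAHit
        rw [h4]
        split_ifs <;> simp [hkey2]
      rw [hA]
      by_cases hpre : ("ttwid".toList).isPrefixOf (PySem.Chars.lstrip l) = true
      · obtain ⟨t₁, ht₁⟩ := List.isPrefixOf_iff_prefix.mp hpre
        have hdrop : (PySem.Chars.lstrip l).drop 5 = t₁ := by
          rw [← ht₁]; exact List.drop_left' (by decide)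
        rw [if_pos hpre, hdrop]
        cases hq : t₁.dropWhile pvCls with
        | nil => rfl
        | cons c v =>
          by_cases hc : c = '='
          · exfalso
            subst hc
            have hsplit1 : t₁ = t₁.takeWhile pvCls ++ '=' :: v := by
              conv_lhs => rw [← List.takeWhile_append_dropWhile (p := pvCls) (l := t₁)]
              rw [hq]
            have hw' : ∀ x ∈ t₁.takeWhile pvCls, pvCls x = true := fun x hx =>
              List.mem_takeWhile_imp hx
            have e1 : (PySem.Chars.lstrip l).takeWhile (fun x => decide (x ≠ '=')) = a := by
              rw [hab, List.takeWhile_append_of_pos (fun x hx => by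
                simp only [decide_eq_true_eq]; exact fun h => hna (h ▸ hx))]
              simp
            have e2 : (PySem.Chars.lstrip l).takeWhile (fun x => decide (x ≠ '='))
                = "ttwid".toList ++ t₁.takeWhile pvCls := by
              rw [← ht₁]
              conv_lhs => rw [hsplit1]
              rw [← List.append_assoc, List.takeWhile_append_of_pos ?all]
              case all =>
                intro x hx
                simp only [decide_eq_true_eq]
                rcases List.mem_append.mp hx with hx | hx
                · intro h; subst h; rw [httw] at hx; revert hx; decide
                · intro h; subst h; have h5 := hw' _ hx; revert h5; decide
              simp
            have ha2 : a = "ttwid".toList ++ t₁.takeWhile pvCls := by rw [← e1, e2]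
            apply hkey
            rw [ha2]
            have hwspace : ∀ x ∈ t₁.takeWhile pvCls, PySem.Chars.isspace x = true := by
              intro x hx
              have hxu : x ∈ PySem.Chars.lstrip l := by
                rw [← ht₁]
                exact List.mem_append_right _ ((List.takeWhile_prefix pvCls).subset hx)
              rw [hspace_cls x hxu]; exact hw' x hx
            rw [show PySem.Chars.strip ("ttwid".toList ++ t₁.takeWhile pvCls)
                = PySem.Chars.rstrip (PySem.Chars.lstrip ("ttwid".toList ++ t₁.takeWhile pvCls)) from rfl]
            rw [show PySem.Chars.lstrip ("ttwid".toList ++ t₁.takeWhile pvCls)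
                = "ttwid".toList ++ t₁.takeWhile pvCls from by
              unfold PySem.Chars.lstrip
              rw [httw]
              simp [show PySem.Chars.isspace 't' = false from by decide]]
            rw [pv_rstrip_space hwspace]
            decide
          · dsimp only
            rw [if_neg hc]
      · rw [if_neg hpre]
  · -- no '=' before the newline: both sides reject the line
    have hmem' : '=' ∉ PySem.Chars.strip l := by
      rw [hsl]; exact fun hc => hmem (pv_mem_rstrip hc)
    have h3 : PySem.Chars.isIn ['='] (PySem.Chars.strip l) = false := by
      rw [← Bool.not_eq_true, PySem.Chars.isIn_iff_infix, List.singleton_infix_iff]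
      exact hmem'
    have hA : pvAHit (PySem.Chars.strip l) = none := by
      unfold pvAHit
      split_ifs with a1 a2 a3
      · rfl
      · rfl
      · rw [h3] at a3; cases a3
      · rfl
    rw [hA]
    by_cases hpre : ("ttwid".toList).isPrefixOf (PySem.Chars.lstrip l) = true
    · obtain ⟨t₁, ht₁⟩ := List.isPrefixOf_iff_prefix.mp hpre
      have hdrop : (PySem.Chars.lstrip l).drop 5 = t₁ := by
        rw [← ht₁]; exact List.drop_left' (by decide)
      rw [if_pos hpre, hdrop]
      cases hq : t₁.dropWhile pvCls with
      | nil => rfl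
      | cons c v =>
        by_cases hc : c = '='
        · exfalso
          subst hc
          apply hmem
          have h6 : '=' ∈ t₁ := (List.dropWhile_sublist pvCls).subset (by rw [hq]; simp)
          rw [← ht₁]
          exact List.mem_append_right _ h6
        · simp [hc]
    · rw [if_neg hpre]

-- pvBTry only looks at the part of the string before the first '\n'
theorem pv_try_split {p : List Char} (hp : '\n' ∉ p) (t : List Char) :
    pvBTry (p ++ '\n' :: t) = pvBTry p := by
  have hcn : pvCls '\n' = false := by decide
  have h1 : (p ++ '\n' :: t).dropWhile pvCls = p.dropWhile pvCls ++ '\n' :: t :=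
    pv_dropWhile_stop hcn p t
  have hr0nl : '\n' ∉ p.dropWhile pvCls := fun hm => hp ((List.dropWhile_sublist pvCls).subset hm)
  simp only [pvBTry]
  rw [h1]
  by_cases hpre : ("ttwid".toList).isPrefixOf (p.dropWhile pvCls) = true
  · have hlen5 : 5 ≤ (p.dropWhile pvCls).length := by
      have := (List.isPrefixOf_iff_prefix.mp hpre).length_le
      simpa using this
    have hpre2 : ("ttwid".toList).isPrefixOf (p.dropWhile pvCls ++ '\n' :: t) = true := by
      rw [List.isPrefixOf_iff_prefix] at hpre ⊢
      exact hpre.trans (List.prefix_append _ _)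
    rw [if_pos hpre2, if_pos hpre, List.drop_append_of_le_length hlen5, pv_dropWhile_stop hcn]
    cases hq : ((p.dropWhile pvCls).drop 5).dropWhile pvCls with
    | nil => simp
    | cons c v =>
      have hvr0 : ∀ x ∈ v, x ∈ p.dropWhile pvCls := by
        intro x hx
        have hmem : x ∈ ((p.dropWhile pvCls).drop 5).dropWhile pvCls := by
          rw [hq]; exact List.mem_cons_of_mem c hx
        exact List.mem_of_mem_drop ((List.dropWhile_sublist pvCls).subset hmem)
      have hvnl : '\n' ∉ v := fun hm => hr0nl (hvr0 _ hm)
      have hvtake : v.takeWhile (fun x => decide (x ≠ '\n')) = v :=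
        List.takeWhile_eq_self_iff.mpr (fun x hx => by
          simp only [decide_eq_true_eq]; exact fun h => hvnl (h ▸ hx))
      have hvtake2 : (v ++ '\n' :: t).takeWhile (fun x => decide (x ≠ '\n')) = v := by
        rw [List.takeWhile_append_of_pos (fun x hx => by
          simp only [decide_eq_true_eq]; exact fun h => hvnl (h ▸ hx))]
        simp
      by_cases hc : c = '='
      · subst hc
        simp only [List.cons_append, hvtake, hvtake2]
      · simp [hc]
  · have hprf : ("ttwid".toList).isPrefixOf (p.dropWhile pvCls) = false :=
      Bool.eq_false_iff.mpr hpre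
    have hpre2 : ("ttwid".toList).isPrefixOf (p.dropWhile pvCls ++ '\n' :: t) = false := by
      rw [← Bool.not_eq_true, List.isPrefixOf_iff_prefix]
      intro hx
      exact hpre (List.isPrefixOf_iff_prefix.mpr
        ((pv_prefix_nl (by decide) (p.dropWhile pvCls) t).mp hx))
    rw [hpre2, hprf]
    simp

theorem pv_modifyHead_id (l : List (List Char)) : List.modifyHead (fun x => x) l = l := by
  cases l <;> rfl

theorem pv_lines_nil : pvLines [] = [[]] := by
  rw [pvLines]
  rfl

theorem pv_lines_cons_nl (rest : List Char) : pvLines ('\n' :: rest) = [] :: pvLines rest := by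
  rw [pvLines]
  have h1 : ('\n' :: rest).dropWhile (fun c => decide (c ≠ '\n')) = '\n' :: rest := by
    rw [List.dropWhile_cons]; simp
  rw [h1]
  simp

theorem pv_lines_cons {c : Char} (hc : c ≠ '\n') (rest : List Char) :
    pvLines (c :: rest) = List.modifyHead (fun x => c :: x) (pvLines rest) := by
  conv_lhs => rw [pvLines]
  conv_rhs => rw [pvLines]
  have h1 : (c :: rest).dropWhile (fun c => decide (c ≠ '\n'))
      = rest.dropWhile (fun c => decide (c ≠ '\n')) := by
    rw [List.dropWhile_cons]; simp [hc]
  have h2 : (c :: rest).takeWhile (fun c => decide (c ≠ '\n'))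
      = c :: rest.takeWhile (fun c => decide (c ≠ '\n')) := by
    rw [List.takeWhile_cons]; simp [hc]
  rw [h1, h2]
  by_cases hd : rest.dropWhile (fun c => decide (c ≠ '\n')) = []
  · rw [dif_pos hd, dif_pos hd]; rfl
  · rw [dif_neg hd, dif_neg hd]; rfl

theorem pv_go_main (s : List Char) : ∀ (fuel : Nat) (cur : List Char) (acc : List (List Char)),
    s.length < fuel →
    PySem.Chars.splitOn.go ['\n'] fuel s cur acc
      = acc.reverse ++ List.modifyHead (fun x => cur.reverse ++ x) (pvLines s) := by
  induction s with
  | nil =>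
    intro fuel cur acc h
    obtain ⟨f, rfl⟩ : ∃ f, fuel = f + 1 := ⟨fuel - 1, by omega⟩
    simp [PySem.Chars.splitOn.go, pv_lines_nil]
  | cons c rest ih =>
    intro fuel cur acc h
    obtain ⟨f, rfl⟩ : ∃ f, fuel = f + 1 := ⟨fuel - 1, by omega⟩
    by_cases hc : c = '\n'
    · subst hc
      simp only [PySem.Chars.splitOn.go]
      rw [if_pos (by simp [List.isPrefixOf])]
      rw [show List.drop (['\n'] : List Char).length ('\n' :: rest) = rest from rfl]
      rw [ih f [] (cur.reverse :: acc) (by simp at h ⊢; omega)]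
      rw [pv_lines_cons_nl]
      simp [pv_modifyHead_id]
    · simp only [PySem.Chars.splitOn.go]
      rw [if_neg (by simp [List.isPrefixOf, Ne.symm hc])]
      rw [ih f (c :: cur) acc (by simp at h ⊢; omega)]
      rw [pv_lines_cons hc, List.modifyHead_modifyHead]
      have : ((fun x => cur.reverse ++ x) ∘ fun (x : List Char) => c :: x)
          = (fun x => (c :: cur).reverse ++ x) := by
        funext x; simp
      rw [this]

-- splitOn with separator '\n' computes pvLines
theorem pv_splitOn_eq (s : List Char) : PySem.Chars.splitOn s ['\n'] = pvLines s := by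
  unfold PySem.Chars.splitOn
  rw [pv_go_main s (s.length + 1) [] [] (by omega)]
  simp [pv_modifyHead_id]

-- the two programs agree, line by line
theorem pv_main : ∀ (n : Nat) (s : List Char), s.length < n →
    (∀ c ∈ s, pvDomChar c = true) → pvALoop (pvLines s) = pvBSearch.go n s := by
  intro n
  induction n with
  | zero => intro s h; omega
  | succ f ih =>
    intro s hlen hdom
    cases hd : s.dropWhile (fun c => decide (c ≠ '\n')) with
    | nil =>
      have hnl : '\n' ∉ s := by
        intro hmem
        simpa using List.dropWhile_eq_nil_iff.mp hd _ hmem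
      have htake : s.takeWhile (fun c => decide (c ≠ '\n')) = s :=
        List.takeWhile_eq_self_iff.mpr (fun x hx => by
          simp only [decide_eq_true_eq]; exact fun h => hnl (h ▸ hx))
      have hlines : pvLines s = [s] := by rw [pvLines, dif_pos hd, htake]
      have hB : pvBSearch.go (f + 1) s
          = match pvBTry s with | some v => some v | none => none := by
        simp only [pvBSearch.go, hd]
      rw [hlines, pv_aloop_cons, hB, pv_try_eq_ahit s hdom hnl]
      cases pvAHit (PySem.Chars.strip s) <;> rfl
    | cons x t =>
      have hx : x = '\n' := by
        have := pv_dropWhile_head (p := fun c => decide (c ≠ '\n')) hd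
        simpa using this
      subst hx
      have hsp : s.takeWhile (fun c => decide (c ≠ '\n')) ++ '\n' :: t = s := by
        conv_rhs => rw [← List.takeWhile_append_dropWhile (p := fun c => decide (c ≠ '\n')) (l := s)]
        rw [hd]
      have hnp : '\n' ∉ s.takeWhile (fun c => decide (c ≠ '\n')) := fun hm => by
        simpa using List.mem_takeWhile_imp hm
      have hpdom : ∀ c ∈ s.takeWhile (fun c => decide (c ≠ '\n')), pvDomChar c = true :=
        fun c hc => hdom c ((List.takeWhile_prefix _).subset hc)
      have hlines : pvLines s = s.takeWhile (fun c => decide (c ≠ '\n')) :: pvLines t := by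
        rw [pvLines, dif_neg (by rw [hd]; simp), hd]
        rfl
      have htlen : t.length < f := by
        have h1 : s.length = (s.takeWhile (fun c => decide (c ≠ '\n'))).length + t.length + 1 := by
          conv_lhs => rw [← hsp]
          simp
          omega
        omega
      have htdom : ∀ c ∈ t, pvDomChar c = true := fun c hc => hdom c (by rw [← hsp]; simp [hc])
      have hBtry : pvBTry s = pvAHit (PySem.Chars.strip (s.takeWhile (fun c => decide (c ≠ '\n')))) := by
        conv_lhs => rw [← hsp]
        rw [pv_try_split hnp, pv_try_eq_ahit _ hpdom hnp]
      have hB : pvBSearch.go (f + 1) s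
          = match pvBTry s with | some v => some v | none => pvBSearch.go f t := by
        simp only [pvBSearch.go, hd]
      rw [hlines, pv_aloop_cons, hB, hBtry, ← ih t htlen htdom]

-- ===== VERDICT =====
theorem parse_ttwid_py_spec : Claim_equal_parse_ttwid_py := by
  intro content hdom _
  unfold Spec_parse_ttwid_py parse_ttwid_py parse_ttwid_py_alt
  have hdl : ∀ c ∈ content.toList, pvDomChar c = true := by
    simpa [Dom_parse_ttwid_py, pvDomStr, List.all_eq_true] using hdom
  rw [pv_splitOn_eq, pv_main (content.toList.length + 1) content.toList (by omega) hdl]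
  rfl
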